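-- pv_equiv track=rewrite | github.com/tlstommy/xurtracker | src/perk_utils.py | perk_sort
-- ===== SOURCE A (Python) =====
-- def perk_sort(perk_list):
--
--
--         sorted_perk_dict = {}
--         #group perks by perkSubType
--         for perk in perk_list:
--             perk_type = perk["perkSubType"]
--             sorted_perk_dict.setdefault(perk_type, []).append(perk)
--
--         sorted_perks = []
--
--         for perks in sorted_perk_dict.values():
--             sorted_perks.extend(perks)
--         return sorted_perks
-- ===== SOURCE B (Python) =====
-- def perk_sort(perk_list):
--     # repeatedly extract the whole group of the first remaining perk's subtype
--     sorted_perks = []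
--     rest = perk_list
--     while rest:
--         t = rest[0]["perkSubType"]
--         sorted_perks += [p for p in rest if p["perkSubType"] == t]
--         rest = [p for p in rest[1:] if p["perkSubType"] != t]
--     return sorted_perks
-- ===== Notes on version B (the rewrite author's own statement) =====
-- stated objective: alternative
-- what changed: Replaces the dict-of-lists grouping plus flatten with a worklist loop that repeatedly extracts the whole group of the first remaining perk's subtype and drops it from the remainder.
import Mathlib
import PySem

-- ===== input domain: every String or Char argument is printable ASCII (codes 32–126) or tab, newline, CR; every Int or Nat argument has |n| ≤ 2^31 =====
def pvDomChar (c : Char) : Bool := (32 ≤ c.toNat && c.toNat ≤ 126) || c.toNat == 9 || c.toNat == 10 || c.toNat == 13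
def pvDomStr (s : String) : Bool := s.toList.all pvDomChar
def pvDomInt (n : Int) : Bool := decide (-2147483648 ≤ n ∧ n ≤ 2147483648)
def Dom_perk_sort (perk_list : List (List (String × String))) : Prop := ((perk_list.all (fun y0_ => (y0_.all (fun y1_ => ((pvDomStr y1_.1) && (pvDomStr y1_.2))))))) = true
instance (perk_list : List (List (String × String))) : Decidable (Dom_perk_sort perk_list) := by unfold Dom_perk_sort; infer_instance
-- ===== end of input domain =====

-- B replaces the dict-of-lists grouping plus flatten with a worklist loop that repeatedly
-- extracts the whole group of the first remaining perk's subtype (alternative, not faster).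

-- ===== PORT A =====
-- perk["perkSubType"]; under Pre_ the key is present, so the default "" is never used
def pvKeyA (perk : List (String × String)) : String :=
  ((PySem.Dict.mk perk).get? "perkSubType").getD ""

def perk_sort (perk_list : List (List (String × String))) : List (List (String × String)) :=
  -- sorted_perk_dict.setdefault(t, []).append(perk)  ==  d[t] = d.get(t, []) + [perk]
  let sorted_perk_dict : PySem.Dict String (List (List (String × String))) :=
    perk_list.foldl (fun d perk => d.modify (pvKeyA perk) [] (· ++ [perk])) PySem.Dict.empty
  -- for perks in sorted_perk_dict.values(): sorted_perks.extend(perks)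
  sorted_perk_dict.values.foldl (fun sorted_perks perks => sorted_perks ++ perks) []

-- ===== PORT B =====
def pvKeyB (perk : List (String × String)) : String :=
  ((PySem.Dict.mk perk).get? "perkSubType").getD ""

-- the 'while rest:' loop of Source B, state = (sorted_perks, rest)
def pvLoopB (sorted_perks : List (List (String × String))) (rest : List (List (String × String))) :
    List (List (String × String)) :=
  match rest with
  | [] => sorted_perks
  | p :: ps =>
      -- t = rest[0]["perkSubType"]; out += [q for q in rest if key == t]; rest = [q for q in rest[1:] if key != t]
      pvLoopB (sorted_perks ++ (p :: ps).filter (fun q => pvKeyB q == pvKeyB p))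
              (ps.filter (fun q => pvKeyB q != pvKeyB p))
termination_by rest.length
decreasing_by
  simp only [List.length_cons, List.length_unattach]
  exact Nat.lt_succ_of_le (le_trans (List.length_filter_le _ _) (by simp))

def perk_sort_alt (perk_list : List (List (String × String))) : List (List (String × String)) :=
  pvLoopB [] perk_list

-- ===== PRECONDITION & SPEC =====
-- A (and B) raise KeyError when some perk lacks the "perkSubType" key; Pre_ excludes exactly those inputs.
def Pre_perk_sort (perk_list : List (List (String × String))) : Prop :=
  (perk_list.all (fun perk => (PySem.Dict.mk perk).contains "perkSubType")) = true
instance (perk_list : List (List (String × String))) : Decidable (Pre_perk_sort perk_list) := by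
  unfold Pre_perk_sort; infer_instance
def pvWitness_perk_sort : (List (List (String × String))) :=
  [[("perkSubType", "barrel"), ("name", "Smallbore")], [("perkSubType", "trait")], [("perkSubType", "barrel")]]

def Spec_perk_sort (perk_list : List (List (String × String))) (out : List (List (String × String))) : Prop := out = perk_sort_alt perk_list
instance (perk_list : List (List (String × String))) (out : List (List (String × String))) : Decidable (Spec_perk_sort perk_list out) := by unfold Spec_perk_sort; infer_instance

-- ===== CLAIM (what is proved, stated in full; the proofs are below) =====
def Claim_equal_perk_sort : Prop := ∀ (perk_list : List (List (String × String))), Dom_perk_sort perk_list → Pre_perk_sort perk_list → Spec_perk_sort perk_list (perk_sort perk_list)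

-- ===== LEMMAS AND PROOFS =====

-- A's grouping loop, rewritten as the pair-wise modify loop the PySem lemmas speak about
theorem pv_dict_eq (perk_list : List (List (String × String))) :
    perk_list.foldl (fun d perk => d.modify (pvKeyA perk) [] (· ++ [perk]))
      (PySem.Dict.empty : PySem.Dict String (List (List (String × String)))) =
    (perk_list.map (fun p => (pvKeyA p, p))).foldl
      (fun d q => d.modify q.1 [] (· ++ [q.2])) PySem.Dict.empty := by
  rw [List.foldl_map]

theorem pv_getD_dict (perk_list : List (List (String × String))) (t : String) :
    (perk_list.foldl (fun d perk => d.modify (pvKeyA perk) [] (· ++ [perk]))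
      (PySem.Dict.empty : PySem.Dict String (List (List (String × String))))).getD t [] =
    perk_list.filter (fun p => pvKeyA p == t) := by
  rw [pv_dict_eq, PySem.Dict.getD_foldl_modify_append]
  simp [List.filter_map, Function.comp_def]

theorem pv_keys_dict (perk_list : List (List (String × String))) :
    (perk_list.foldl (fun d perk => d.modify (pvKeyA perk) [] (· ++ [perk]))
      (PySem.Dict.empty : PySem.Dict String (List (List (String × String))))).keys =
    PySem.Set.ofList (perk_list.map pvKeyA) := by
  rw [PySem.Dict.keys_foldl_modify_key]
  simp [PySem.Dict.keys_empty, PySem.Set.update_nil_left]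

-- A's result, characterised: the distinct subtypes in first-appearance order, each group filtered out
theorem pv_A_char (perk_list : List (List (String × String))) :
    perk_sort perk_list =
    (PySem.Set.ofList (perk_list.map pvKeyA)).flatMap
      (fun t => perk_list.filter (fun p => pvKeyA p == t)) := by
  unfold perk_sort
  rw [PySem.List.foldl_append_eq_flatMap]
  have hnd : (perk_list.foldl (fun d perk => d.modify (pvKeyA perk) [] (· ++ [perk]))
      (PySem.Dict.empty : PySem.Dict String (List (List (String × String))))).keys.Nodup := by
    rw [pv_keys_dict]; exact PySem.Set.nodup_ofList _
  rw [PySem.Dict.values_eq_map_keys _ hnd ([] : List (List (String × String)))]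
  rw [pv_keys_dict, List.flatMap_map]
  simp only [List.nil_append]
  exact List.flatMap_congr (fun t _ => pv_getD_dict perk_list t)

-- adding an element already present is a no-op, so duplicates of x can be dropped from the input
theorem pv_foldl_add_filter (x : String) (xs : List String) :
    ∀ s : PySem.Set String, x ∈ s →
      xs.foldl PySem.Set.add s = (xs.filter (fun y => y != x)).foldl PySem.Set.add s := by
  induction xs with
  | nil => intro s _; rfl
  | cons y ys ih =>
      intro s hx
      by_cases hyx : y = x
      · subst hyx
        have hadd : PySem.Set.add s y = s := by
          simp [PySem.Set.add, PySem.Set.contains, hx]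
        simp only [List.filter_cons, bne_self_eq_false, Bool.false_eq_true, if_false,
          List.foldl_cons, hadd]
        exact ih s hx
      · have hcond : (y != x) = true := by simp [hyx]
        simp only [List.filter_cons, hcond, if_pos, List.foldl_cons]
        have hx' : x ∈ PySem.Set.add s y := by
          unfold PySem.Set.add
          split
          · exact hx
          · exact List.mem_append_left _ hx
        exact ih _ hx'

-- elements different from x never look at a leading x in the accumulator
theorem pv_foldl_add_cons (x : String) (ys : List String) :
    ∀ s : List String, (∀ y ∈ ys, y ≠ x) →
      ys.foldl PySem.Set.add (x :: s) = x :: ys.foldl PySem.Set.add s := by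
  induction ys with
  | nil => intro s _; rfl
  | cons y t ih =>
      intro s h
      have hyx : y ≠ x := h y (by simp)
      have hadd : PySem.Set.add (x :: s) y = x :: PySem.Set.add s y := by
        simp [PySem.Set.add, PySem.Set.contains, hyx]
        split <;> simp_all
      simp only [List.foldl_cons, hadd]
      exact ih _ (fun z hz => h z (by simp [hz]))

-- ordered dedup, one step: first element, then dedup of the rest with its duplicates removed
theorem pv_ofList_cons (x : String) (xs : List String) :
    PySem.Set.ofList (x :: xs) = x :: PySem.Set.ofList (xs.filter (fun y => y != x)) := by
  rw [PySem.Set.ofList_eq_foldl, PySem.Set.ofList_eq_foldl]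
  simp only [List.foldl_cons]
  have h1 : (PySem.Set.add ([] : PySem.Set String) x) = [x] := rfl
  rw [h1, pv_foldl_add_filter x xs [x] (by simp)]
  exact pv_foldl_add_cons x _ [] (fun y hy => by
    have := List.of_mem_filter hy; simpa [bne_iff_ne] using this)

-- the loop of B computes A's characterisation, for any accumulator (strong induction on |rest|)
theorem pv_loopB_eq_aux (n : Nat) :
    ∀ rest : List (List (String × String)), rest.length ≤ n → ∀ out,
      pvLoopB out rest =
      out ++ (PySem.Set.ofList (rest.map pvKeyA)).flatMap
        (fun t => rest.filter (fun p => pvKeyA p == t)) := by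
  induction n with
  | zero =>
      intro rest h out
      have : rest = [] := List.eq_nil_of_length_eq_zero (Nat.le_zero.mp h)
      subst this
      simp [pvLoopB, PySem.Set.ofList]
  | succ n ihn =>
      intro rest h out
      match rest with
      | [] => simp [pvLoopB, PySem.Set.ofList]
      | p :: ps =>
      rw [pvLoopB]
      rw [ihn (ps.filter (fun q => pvKeyB q != pvKeyB p))
            (le_trans (List.length_filter_le _ _) (Nat.le_of_succ_le_succ h))]
      have hmap : (ps.map pvKeyA).filter (fun y => y != pvKeyA p) =
          (ps.filter (fun q => pvKeyB q != pvKeyB p)).map pvKeyA := by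
        rw [List.filter_map]; rfl
      have hofl : PySem.Set.ofList ((p :: ps).map pvKeyA) =
          pvKeyA p :: PySem.Set.ofList ((ps.filter (fun q => pvKeyB q != pvKeyB p)).map pvKeyA) := by
        rw [List.map_cons, pv_ofList_cons, hmap]
      rw [hofl, List.flatMap_cons, List.append_assoc]
      congr 1
      have h1 : (fun q => pvKeyB q == pvKeyB p) = (fun q => pvKeyA q == pvKeyA p) := rfl
      rw [h1]
      congr 1
      apply List.flatMap_congr
      intro t ht
      have htne : t ≠ pvKeyA p := by
        have hmem : t ∈ (ps.filter (fun q => pvKeyB q != pvKeyB p)).map pvKeyA :=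
          (PySem.Set.mem_ofList _ _).mp ht
        obtain ⟨q, hq, rfl⟩ := List.mem_map.mp hmem
        have := List.of_mem_filter hq
        simpa [pvKeyA, pvKeyB, bne_iff_ne] using this
      -- filtering on t after dropping the p-group = filtering the whole tail on t
      rw [List.filter_cons_of_neg (by simpa using Ne.symm htne)]
      rw [List.filter_filter]
      apply List.filter_congr
      intro q _
      by_cases hq : pvKeyA q = t
      · have h2 : (pvKeyB q != pvKeyB p) = true := by
          simp only [show pvKeyB = pvKeyA from rfl, bne_iff_ne, ne_eq]
          rw [hq]; simpa using htne
        simp [hq, h2]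
      · simp [hq]

-- ===== VERDICT (by name: the statement is the Claim_ definition above) =====
theorem perk_sort_spec : Claim_equal_perk_sort := by
  intro perk_list _ _
  show perk_sort perk_list = perk_sort_alt perk_list
  rw [pv_A_char, perk_sort_alt, pv_loopB_eq_aux perk_list.length perk_list (Nat.le_refl _)]
  rfl
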